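-- pv_equiv track=rewrite | github.com/zyy20009619/cluster | algos/CommonFunction.py | JudgeToFile
-- ===== SOURCE A (Python) =====
-- def JudgeToFile(filename):
--     haveHigh = False
--     for fileIndex in range(len(filename)):
--         if 'A' <= filename[fileIndex] <= 'Z':
--             for extendIndex in range(fileIndex + 1, len(filename)):
--                 if filename[extendIndex] == '.':
--                     haveHigh = True
--                     break
--     return haveHigh
-- ===== SOURCE B (Python) =====
-- def JudgeToFile(filename):
--     seen_upper = False
--     result = False
--     for c in filename:
--         if 'A' <= c <= 'Z':
--             seen_upper = True
--         elif c == '.' and seen_upper: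
--             result = True
--     return result
-- ===== Notes on version B (the rewrite author's own statement) =====
-- stated objective: alternative
-- what changed: Replaced the nested outer-uppercase / inner-scan-for-dot loops by a single left-to-right pass that carries a seen_upper flag and sets the result when a dot follows an uppercase letter.
import Mathlib
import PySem

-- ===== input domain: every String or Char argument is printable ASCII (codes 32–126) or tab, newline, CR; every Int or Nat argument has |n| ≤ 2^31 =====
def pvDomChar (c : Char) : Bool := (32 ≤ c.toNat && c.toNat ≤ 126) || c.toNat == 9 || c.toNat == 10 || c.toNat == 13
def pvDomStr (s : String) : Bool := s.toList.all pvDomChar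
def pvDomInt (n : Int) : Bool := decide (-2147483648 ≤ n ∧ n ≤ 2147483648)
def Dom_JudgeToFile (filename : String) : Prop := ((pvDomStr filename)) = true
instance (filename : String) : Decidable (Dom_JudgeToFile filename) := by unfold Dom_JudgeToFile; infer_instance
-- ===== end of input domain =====

-- B replaces A's nested loops (for each uppercase letter, scan the rest for a dot) with a
-- single pass carrying a seen_upper flag: a different, single-loop algorithm, same return value.

-- ===== PORT A =====
-- inner loop: 'for extendIndex in range(fileIndex+1, len(filename)): if '.' : haveHigh = True; break'
def JudgeToFileInner (l : List Char) (j n : Nat) (h : Bool) : Bool :=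
  if j < n then
    (if (l[j]?).getD ' ' = '.' then true else JudgeToFileInner l (j + 1) n h)
  else h
termination_by n - j

-- outer loop: 'for fileIndex in range(len(filename))' with accumulator haveHigh
def JudgeToFileOuter (l : List Char) (i n : Nat) (h : Bool) : Bool :=
  if i < n then
    JudgeToFileOuter l (i + 1) n
      (if 'A' ≤ (l[i]?).getD ' ' ∧ (l[i]?).getD ' ' ≤ 'Z' then JudgeToFileInner l (i + 1) n h else h)
  else h
termination_by n - i

def JudgeToFile (filename : String) : Bool :=
  JudgeToFileOuter filename.toList 0 filename.toList.length false

-- ===== PORT B =====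
-- single pass: state (seen_upper, result)
def JudgeToFile_alt (filename : String) : Bool :=
  (filename.toList.foldl
    (fun (st : Bool × Bool) c =>
      if 'A' ≤ c ∧ c ≤ 'Z' then (true, st.2)
      else if c = '.' ∧ st.1 then (st.1, true)
      else st)
    (false, false)).2

-- ===== PRECONDITION & SPEC =====
def Spec_JudgeToFile (filename : String) (out : Bool) : Prop := out = JudgeToFile_alt filename
instance (filename : String) (out : Bool) : Decidable (Spec_JudgeToFile filename out) := by unfold Spec_JudgeToFile; infer_instance

-- ===== CLAIM (what is proved, stated in full; the proofs are below) =====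
def Claim_equal_JudgeToFile : Prop := ∀ (filename : String), Dom_JudgeToFile filename → Spec_JudgeToFile filename (JudgeToFile filename)

-- ===== LEMMAS AND PROOFS =====

-- common characterisation: some uppercase letter has a '.' somewhere after it
def hasUpperDot : List Char → Bool
  | [] => false
  | c :: t => ((decide ('A' ≤ c ∧ c ≤ 'Z')) && t.contains '.') || hasUpperDot t

theorem drop_cons (l : List Char) (j : Nat) (hj : j < l.length) :
    l.drop j = (l[j]?).getD ' ' :: l.drop (j + 1) := by
  rw [List.drop_eq_getElem_cons hj]
  simp [List.getElem?_eq_getElem hj]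

theorem inner_eq (l : List Char) (j : Nat) (h : Bool) :
    JudgeToFileInner l j l.length h = (h || (l.drop j).contains '.') := by
  unfold JudgeToFileInner
  by_cases hj : j < l.length
  · rw [drop_cons l j hj]
    simp only [hj, if_true, List.contains_cons]
    by_cases hd : (l[j]?).getD ' ' = '.'
    · simp [hd]
    · have hb : ('.' == (l[j]?).getD ' ') = false := by
        simp only [beq_eq_false_iff_ne, ne_eq]
        exact fun e => hd e.symm
      rw [if_neg hd, inner_eq l (j + 1) h]
      simp [hb]
  · simp [hj, List.drop_eq_nil_of_le (le_of_not_gt hj)]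
termination_by l.length - j

theorem outer_eq (l : List Char) (j : Nat) (h : Bool) :
    JudgeToFileOuter l j l.length h = (h || hasUpperDot (l.drop j)) := by
  unfold JudgeToFileOuter
  by_cases hj : j < l.length
  · simp only [hj, if_true]
    rw [outer_eq l (j + 1)]
    rw [drop_cons l j hj]
    by_cases hu : 'A' ≤ (l[j]?).getD ' ' ∧ (l[j]?).getD ' ' ≤ 'Z'
    · rw [if_pos hu, inner_eq]
      simp [hasUpperDot, hu.1, hu.2, Bool.or_assoc]
    · rw [if_neg hu]
      have hb : (decide ('A' ≤ (l[j]?).getD ' ' ∧ (l[j]?).getD ' ' ≤ 'Z')) = false := by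
        simp only [decide_eq_false_iff_not]
        exact hu
      simp only [hasUpperDot, hb, Bool.false_and, Bool.false_or]
  · simp [hj, List.drop_eq_nil_of_le (le_of_not_gt hj), hasUpperDot]
termination_by l.length - j

theorem alt_eq (l : List Char) (s r : Bool) :
    (l.foldl
      (fun (st : Bool × Bool) c =>
        if 'A' ≤ c ∧ c ≤ 'Z' then (true, st.2)
        else if c = '.' ∧ st.1 then (st.1, true)
        else st)
      (s, r)).2 = (r || (s && l.contains '.') || hasUpperDot l) := by
  induction l generalizing s r with
  | nil => simp [hasUpperDot]
  | cons c t ih =>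
    simp only [List.foldl_cons, List.contains_cons, hasUpperDot]
    by_cases hu : 'A' ≤ c ∧ c ≤ 'Z'
    · have hc : ¬ (c = '.') := by
        rintro rfl; exact absurd hu (by decide)
      rw [if_pos hu, ih]
      have hb : ('.' == c) = false := by simp [Ne.symm hc]
      simp only [hb, Bool.false_or, hu, and_self,
        decide_true, Bool.true_and]
      cases r <;> cases s <;> cases t.contains '.' <;> simp
    · rw [if_neg hu]
      by_cases hds : c = '.' ∧ s
      · rw [if_pos hds, ih]
        simp [hds.1, hds.2]
      · rw [if_neg hds, ih]
        by_cases hc : c = '.'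
        · have hs : s = false := by
            cases s
            · rfl
            · exact absurd ⟨hc, rfl⟩ hds
          simp [hc, hs]
        · have hb : ('.' == c) = false := by simp [Ne.symm hc]
          simp [hb, hu]

-- ===== VERDICT (by name: the statement is the Claim_ definition above) =====
theorem JudgeToFile_spec : Claim_equal_JudgeToFile := by
  intro filename _
  unfold Spec_JudgeToFile JudgeToFile JudgeToFile_alt
  rw [outer_eq, alt_eq]
  simp
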